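-- pv_equiv track=rewrite | github.com/M1ghtyPirate/RecognitionLabs | Lab02NeuralLayer/Lab02NeuralLayer.py | getUnusedElementIndexes
-- ===== SOURCE A (Python) =====
-- def getUnusedElementIndexes(weightMatrix: tuple[list[list[int]], float]) -> list[int]:
--     '''Получение индексов неиспользуемых элементов образов по матрице весов'''
--     if max(len(w) for w in weightMatrix[0]) != min(len(w) for w in weightMatrix[0]):
--         raise ValueError("Invalid arguments for element analysis.")
--     elementCount = len(weightMatrix[0][0])
--     elementUsage = list(map(lambda x: 0, range(elementCount)))
--     for i in range(len(weightMatrix[0])):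
--         for j in range(elementCount):
--             elementUsage[j] += 1 if weightMatrix[0][i][j] != 0 else 0
--     unusedElementIndexes = []
--     for i in range(elementCount):
--         if elementUsage[i] == 0:
--             unusedElementIndexes.append(i)
--     return unusedElementIndexes
-- ===== SOURCE B (Python) =====
-- def getUnusedElementIndexes(weightMatrix: tuple[list[list[int]], float]) -> list[int]:
--     rows = weightMatrix[0]
--     if max(len(w) for w in rows) != min(len(w) for w in rows):
--         raise ValueError("Invalid arguments for element analysis.")
--     return [j for j in range(len(rows[0])) if all(row[j] == 0 for row in rows)]
-- ===== Notes on version B (the rewrite author's own statement) =====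
-- stated objective: simpler
-- what changed: B drops A's mutable elementUsage count array and its two row-major passes: it checks each column directly in one column-wise scan with an early-exit all(), emitting the index immediately.
import Mathlib
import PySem

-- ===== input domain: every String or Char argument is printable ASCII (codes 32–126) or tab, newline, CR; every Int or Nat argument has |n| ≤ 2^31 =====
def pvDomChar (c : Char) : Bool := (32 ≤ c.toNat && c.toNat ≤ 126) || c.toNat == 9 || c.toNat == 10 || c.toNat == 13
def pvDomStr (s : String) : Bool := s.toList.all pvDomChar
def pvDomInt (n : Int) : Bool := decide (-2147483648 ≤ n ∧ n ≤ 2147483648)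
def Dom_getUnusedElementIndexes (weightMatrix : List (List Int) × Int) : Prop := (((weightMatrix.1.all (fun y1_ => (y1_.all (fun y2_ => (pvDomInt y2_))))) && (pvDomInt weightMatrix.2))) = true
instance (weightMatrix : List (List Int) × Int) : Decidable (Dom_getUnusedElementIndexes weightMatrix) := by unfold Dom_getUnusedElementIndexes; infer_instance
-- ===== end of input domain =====

-- B replaces A's mutable elementUsage count array and two row-major passes by one direct
-- column-wise scan (objective: simpler). On empty or jagged row lists both Pythons raise
-- ValueError; those inputs are outside Pre_.

-- ===== PORT A =====
-- A's inner 'for j in range(elementCount): elementUsage[j] += …' (row indexing is exact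
-- under Pre_, where every row has length elementCount)
def pvUsageRow (row : List Int) (n : Nat) (u : List Int) : List Int :=
  (List.range n).foldl (fun u j => u.set j (u.getD j 0 + if row.getD j 0 ≠ 0 then 1 else 0)) u

def getUnusedElementIndexes (weightMatrix : List (List Int) × Int) : List Int :=
  let rows := weightMatrix.1
  let elementCount := (rows.headD []).length
  let elementUsage := rows.foldl (fun u row => pvUsageRow row elementCount u)
      (List.replicate elementCount (0 : Int))
  ((List.range elementCount).filter (fun i => elementUsage.getD i 0 == 0)).map Int.ofNat

-- ===== PORT B =====
def getUnusedElementIndexes_alt (weightMatrix : List (List Int) × Int) : List Int :=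
  let rows := weightMatrix.1
  ((List.range (rows.headD []).length).filter
      (fun j => rows.all (fun row => row.getD j 0 == 0))).map Int.ofNat

-- ===== PRECONDITION & SPEC =====
-- Pre_ excludes exactly the inputs where Python A raises ValueError: an empty list of rows
-- (max() of an empty sequence) or rows of unequal lengths (the explicit raise).
def Pre_getUnusedElementIndexes (weightMatrix : List (List Int) × Int) : Prop :=
  weightMatrix.1 ≠ [] ∧
  ∀ r ∈ weightMatrix.1, r.length = (weightMatrix.1.headD []).length
instance (weightMatrix : List (List Int) × Int) : Decidable (Pre_getUnusedElementIndexes weightMatrix) := by unfold Pre_getUnusedElementIndexes; infer_instance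

def pvWitness_getUnusedElementIndexes : (List (List Int) × Int) := ([[0, 1], [0, 0]], 0)

def Spec_getUnusedElementIndexes (weightMatrix : List (List Int) × Int) (out : List Int) : Prop := out = getUnusedElementIndexes_alt weightMatrix
instance (weightMatrix : List (List Int) × Int) (out : List Int) : Decidable (Spec_getUnusedElementIndexes weightMatrix out) := by unfold Spec_getUnusedElementIndexes; infer_instance

-- ===== CLAIM (what is proved, stated in full; the proofs are below) =====
def Claim_equal_getUnusedElementIndexes : Prop := ∀ (weightMatrix : List (List Int) × Int), Dom_getUnusedElementIndexes weightMatrix → Pre_getUnusedElementIndexes weightMatrix → Spec_getUnusedElementIndexes weightMatrix (getUnusedElementIndexes weightMatrix)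

-- ===== LEMMAS AND PROOFS =====

lemma pvUsageRow_succ (row : List Int) (n : Nat) (u : List Int) :
    pvUsageRow row (n+1) u =
      (pvUsageRow row n u).set n
        ((pvUsageRow row n u).getD n 0 + if row.getD n 0 ≠ 0 then 1 else 0) := by
  unfold pvUsageRow
  rw [List.range_succ, List.foldl_append]
  rfl

lemma pvUsageRow_length (row : List Int) (n : Nat) (u : List Int) :
    (pvUsageRow row n u).length = u.length := by
  induction n generalizing u with
  | zero => rfl
  | succ k ih => rw [pvUsageRow_succ, List.length_set, ih]

lemma pvUsageRow_getD_ge (row : List Int) (n : Nat) (u : List Int) (j : Nat) (h : n ≤ j) :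
    (pvUsageRow row n u).getD j 0 = u.getD j 0 := by
  induction n generalizing u with
  | zero => rfl
  | succ k ih =>
    rw [pvUsageRow_succ]
    rw [List.getD_eq_getElem?_getD, List.getElem?_set_ne (by omega),
        ← List.getD_eq_getElem?_getD]
    exact ih u (by omega)

lemma pvUsageRow_getD_lt (row : List Int) (n : Nat) (u : List Int) (j : Nat)
    (hj : j < n) (hu : n ≤ u.length) :
    (pvUsageRow row n u).getD j 0 =
      u.getD j 0 + if row.getD j 0 ≠ 0 then 1 else 0 := by
  induction n generalizing u with
  | zero => omega
  | succ k ih =>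
    rw [pvUsageRow_succ]
    rcases Nat.lt_or_ge j k with h | h
    · rw [List.getD_eq_getElem?_getD, List.getElem?_set_ne (by omega),
          ← List.getD_eq_getElem?_getD]
      exact ih u h (by omega)
    · have hjk : j = k := by omega
      subst hjk
      have hlen : j < (pvUsageRow row j u).length := by
        rw [pvUsageRow_length]; omega
      have hset : ∀ (l : List Int) (v : Int), j < l.length → (l.set j v).getD j 0 = v :=
        fun l v h => by simp [List.getD_eq_getElem?_getD, h]
      rw [hset _ _ hlen, pvUsageRow_getD_ge row j u j le_rfl]

-- usage after folding all rows: at each j < n it counts the rows nonzero at j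
lemma usage_fold_getD (rs : List (List Int)) (n : Nat) (u : List Int) (j : Nat)
    (hj : j < n) (hu : u.length = n) :
    (rs.foldl (fun u row => pvUsageRow row n u) u).getD j 0 =
      u.getD j 0 + (rs.countP (fun row => decide (row.getD j 0 ≠ 0)) : Int) := by
  induction rs generalizing u with
  | nil => simp
  | cons r rs ih =>
    simp only [List.foldl_cons, List.countP_cons]
    rw [ih _ (by rw [pvUsageRow_length]; exact hu),
        pvUsageRow_getD_lt r n u j hj (by omega)]
    by_cases h : r.getD j 0 = 0 <;> simp [h] <;> ring

lemma usage_zero_iff (rs : List (List Int)) (n : Nat) (j : Nat) (hj : j < n) :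
    ((rs.foldl (fun u row => pvUsageRow row n u) (List.replicate n (0 : Int))).getD j 0 == 0)
      = rs.all (fun row => row.getD j 0 == 0) := by
  rw [usage_fold_getD rs n _ j hj (by simp)]
  have hrep : (List.replicate n (0 : Int)).getD j 0 = 0 := by
    rw [List.getD_eq_getElem?_getD, List.getElem?_replicate]
    split <;> rfl
  rw [hrep, zero_add]
  cases hb : rs.all (fun row => row.getD j 0 == 0) with
  | true =>
    have hc : rs.countP (fun row => decide (row.getD j 0 ≠ 0)) = 0 := by
      apply List.countP_eq_zero.2
      intro r hr
      simpa using (List.all_eq_true.mp hb) r hr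
    rw [hc]
    rfl
  | false =>
    obtain ⟨r, hr, hner⟩ := List.all_eq_false.mp hb
    have hc : 0 < rs.countP (fun row => decide (row.getD j 0 ≠ 0)) := by
      apply List.countP_pos_iff.mpr
      exact ⟨r, hr, by simpa using hner⟩
    simp only [beq_eq_false_iff_ne, ne_eq]
    exact_mod_cast hc.ne'

-- ===== VERDICT (by name: the statement is the Claim_ definition above) =====
theorem getUnusedElementIndexes_spec : Claim_equal_getUnusedElementIndexes := by
  intro wm _ _
  unfold Spec_getUnusedElementIndexes getUnusedElementIndexes getUnusedElementIndexes_alt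
  dsimp only
  congr 1
  apply List.filter_congr
  intro j hj
  exact usage_zero_iff wm.1 _ j (List.mem_range.mp hj)
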